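-- pv_equiv track=rewrite | github.com/wasdwasd0105/awad_tflite_android | src/dataloader.py | artifact_getter
-- ===== SOURCE A (Python) =====
-- def artifact_getter(time,annotation):
--     artifact_axis = []
--     for i in range(len(time)):
--         ##### !!!! CHANGED TO REFLECT OLD METHOD BEING APPLIED
--         append_num = 1
--         for arti_interval in annotation:
--             if time[i] >= arti_interval[0] and time[i] <= arti_interval[1]:
--                 append_num = 0
--         artifact_axis.append(append_num)
--     return artifact_axis
-- ===== SOURCE B (Python) =====
-- from bisect import bisect_right
--
-- def artifact_getter(time, annotation):
--     # Sort intervals by start, merge overlapping ones once, then binary-search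
--     # each time point; O((n+m) log m) instead of A's O(n*m).
--     ivs = sorted(((a[0], a[1]) for a in annotation), key=lambda p: p[0])
--     merged = []
--     cur = None
--     for lo, hi in ivs:
--         if cur is None:
--             cur = (lo, hi)
--         elif lo <= cur[1]:
--             if hi > cur[1]:
--                 cur = (cur[0], hi)
--         else:
--             merged.append(cur)
--             cur = (lo, hi)
--     if cur is not None:
--         merged.append(cur)
--     starts = [p[0] for p in merged]
--     ends = [p[1] for p in merged]
--     return [0 if (j := bisect_right(starts, t)) > 0 and t <= ends[j - 1] else 1
--             for t in time]
-- ===== Notes on version B (the rewrite author's own statement) =====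
-- stated objective: faster
-- what changed: Replaces A's nested scan of all intervals per time point by sorting the intervals once, merging them into disjoint intervals, and binary-searching each time point for membership.
-- outside the precondition, e.g. on artifact_getter([], [[1]]): A returns [], B raises IndexError; on artifact_getter([0], [[5]]): A returns [1], B raises IndexError
import Mathlib
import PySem

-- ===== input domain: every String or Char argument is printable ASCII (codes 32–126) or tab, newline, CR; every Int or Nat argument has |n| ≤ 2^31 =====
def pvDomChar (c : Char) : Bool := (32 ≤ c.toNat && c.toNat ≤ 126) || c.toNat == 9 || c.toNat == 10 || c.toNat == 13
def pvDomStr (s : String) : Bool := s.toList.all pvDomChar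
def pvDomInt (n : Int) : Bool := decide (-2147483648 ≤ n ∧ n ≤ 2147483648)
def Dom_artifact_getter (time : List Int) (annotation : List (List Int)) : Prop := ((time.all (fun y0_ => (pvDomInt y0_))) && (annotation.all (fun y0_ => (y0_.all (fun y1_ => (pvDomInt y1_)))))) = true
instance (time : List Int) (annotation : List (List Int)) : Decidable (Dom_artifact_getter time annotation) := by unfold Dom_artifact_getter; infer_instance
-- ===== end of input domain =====

-- B replaces A's per-time-point scan of every interval by sort + merge + binary search
-- (objective: faster, asymptotic). Return-value equivalence; neither program mutates its arguments.

-- ===== PORT A =====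
def artifact_getter (time : List Int) (annotation : List (List Int)) : List Int :=
  (PySem.List.pyRange 0 (PySem.List.len time) 1).foldl (fun artifact_axis i =>
    let append_num : Int :=
      annotation.foldl (fun append_num arti_interval =>
        if PySem.List.pyGetD arti_interval 0 0 ≤ PySem.List.pyGetD time i 0 ∧
           PySem.List.pyGetD time i 0 ≤ PySem.List.pyGetD arti_interval 1 0 then 0 else append_num) 1
    artifact_axis ++ [append_num]) []

-- ===== PORT B =====
-- B-side helpers (the merge loop of Source B, state = (merged, cur))
def pvMergeStep (st : List (Int × Int) × Option (Int × Int)) (p : Int × Int) :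
    List (Int × Int) × Option (Int × Int) :=
  match st.2 with
  | none => (st.1, some p)
  | some c =>
    if p.1 ≤ c.2 then
      (if c.2 < p.2 then (st.1, some (c.1, p.2)) else st)
    else (st.1 ++ [c], some p)

def pvFinalize (st : List (Int × Int) × Option (Int × Int)) : List (Int × Int) :=
  match st.2 with
  | none => st.1
  | some c => st.1 ++ [c]

def artifact_getter_alt (time : List Int) (annotation : List (List Int)) : List Int :=
  let ivs : List (Int × Int) := PySem.List.sorted
    (annotation.map (fun a => (PySem.List.pyGetD a 0 0, PySem.List.pyGetD a 1 0)))
    (fun p => p.1)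
  let merged : List (Int × Int) := pvFinalize (ivs.foldl pvMergeStep ([], none))
  let starts : List Int := merged.map (fun p => p.1)
  let ends : List Int := merged.map (fun p => p.2)
  time.map (fun t =>
    let j : Nat := PySem.List.bisectRight starts t
    if 0 < j ∧ t ≤ ends.getD (j - 1) 0 then (0 : Int) else 1)

-- ===== PRECONDITION & SPEC =====
-- Pre_ excludes annotations containing an interval list with fewer than 2 elements: A raises
-- IndexError on them except when the time list is empty or the `and` short-circuits for every
-- time point, while B always reads both endpoints (and raises there too).
def Pre_artifact_getter (time : List Int) (annotation : List (List Int)) : Prop :=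
  ∀ iv ∈ annotation, 2 ≤ iv.length
instance (time : List Int) (annotation : List (List Int)) : Decidable (Pre_artifact_getter time annotation) := by unfold Pre_artifact_getter; infer_instance

def pvWitness_artifact_getter : List Int × List (List Int) := ([0, 2, 5, 10], [[1, 3], [4, 6]])

def Spec_artifact_getter (time : List Int) (annotation : List (List Int)) (out : List Int) : Prop := out = artifact_getter_alt time annotation
instance (time : List Int) (annotation : List (List Int)) (out : List Int) : Decidable (Spec_artifact_getter time annotation out) := by unfold Spec_artifact_getter; infer_instance

-- ===== CLAIM (what is proved, stated in full; the proofs are below) =====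
def Claim_equal_artifact_getter : Prop := ∀ (time : List Int) (annotation : List (List Int)), Dom_artifact_getter time annotation → Pre_artifact_getter time annotation → Spec_artifact_getter time annotation (artifact_getter time annotation)

-- ===== LEMMAS AND PROOFS =====

-- "t lies in some closed interval of l" (Bool so it can sit inside an `if`)
def pvCov (l : List (Int × Int)) (t : Int) : Bool :=
  l.any (fun p => decide (p.1 ≤ t) && decide (t ≤ p.2))

theorem pvCov_iff (l : List (Int × Int)) (t : Int) :
    pvCov l t = true ↔ ∃ p ∈ l, p.1 ≤ t ∧ t ≤ p.2 := by simp [pvCov]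

theorem pvCov_nil (t : Int) : pvCov [] t = false := rfl

theorem pvCov_cons (p : Int × Int) (l : List (Int × Int)) (t : Int) :
    pvCov (p :: l) t = ((decide (p.1 ≤ t) && decide (t ≤ p.2)) || pvCov l t) := by
  simp [pvCov]

theorem pvCov_append (l₁ l₂ : List (Int × Int)) (t : Int) :
    pvCov (l₁ ++ l₂) t = (pvCov l₁ t || pvCov l₂ t) := by simp [pvCov]

-- the disjoint, ordered shape of the merged list
def pvR (a b : Int × Int) : Prop := a.1 ≤ b.1 ∧ a.2 < b.1

theorem pvR_def (a b : Int × Int) : pvR a b ↔ (a.1 ≤ b.1 ∧ a.2 < b.1) := Iff.rfl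

-- A's inner loop is a covering test
theorem pvInnerFold (t : Int) (l : List (List Int)) : ∀ acc : Int,
    l.foldl (fun append_num arti_interval =>
      if PySem.List.pyGetD arti_interval 0 0 ≤ t ∧ t ≤ PySem.List.pyGetD arti_interval 1 0
      then 0 else append_num) acc
    = if pvCov (l.map (fun a => (PySem.List.pyGetD a 0 0, PySem.List.pyGetD a 1 0))) t
      then 0 else acc := by
  induction l with
  | nil => intro acc; simp [pvCov]
  | cons a l ih =>
    intro acc
    simp only [List.foldl_cons, List.map_cons, pvCov_cons]
    rw [ih]
    by_cases h1 : PySem.List.pyGetD a 0 0 ≤ t ∧ t ≤ PySem.List.pyGetD a 1 0 <;>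
      by_cases h2 : pvCov (l.map (fun a => (PySem.List.pyGetD a 0 0, PySem.List.pyGetD a 1 0))) t = true <;>
      simp [h1, h2]

-- A's output, as a map over time
theorem pvA_eq_map (time : List Int) (annotation : List (List Int)) :
    artifact_getter time annotation
    = time.map (fun t =>
        if pvCov (annotation.map (fun a => (PySem.List.pyGetD a 0 0, PySem.List.pyGetD a 1 0))) t
        then (0 : Int) else 1) := by
  unfold artifact_getter
  rw [PySem.List.foldl_pyRange_zero_pyGetD time 0
      (fun acc t => acc ++ [annotation.foldl (fun append_num arti_interval =>
        if PySem.List.pyGetD arti_interval 0 0 ≤ t ∧ t ≤ PySem.List.pyGetD arti_interval 1 0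
        then 0 else append_num) 1]) []]
  rw [PySem.List.foldl_append_singleton_eq_map]
  simp only [List.nil_append]
  exact List.map_congr_left (fun t _ => pvInnerFold t annotation 1)

-- the merge loop: coverage is preserved and the result is pairwise-disjoint, ordered
theorem pvMergeGo (l : List (Int × Int)) : ∀ (m : List (Int × Int)) (c : Int × Int),
    l.Pairwise (fun a b => a.1 ≤ b.1) →
    (∀ p ∈ l, c.1 ≤ p.1) →
    (m ++ [c]).Pairwise pvR →
    (∀ t, pvCov (pvFinalize (l.foldl pvMergeStep (m, some c))) t
        = (pvCov (m ++ [c]) t || pvCov l t)) ∧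
    (pvFinalize (l.foldl pvMergeStep (m, some c))).Pairwise pvR := by
  induction l with
  | nil =>
    intro m c _ _ hinv
    exact ⟨fun t => by simp [pvFinalize, pvCov_nil], by simpa [pvFinalize] using hinv⟩
  | cons p l ih =>
    intro m c hl hcl hinv
    have hcp : c.1 ≤ p.1 := hcl p (by simp)
    have hl' : l.Pairwise (fun a b => a.1 ≤ b.1) := hl.tail
    have hpl : ∀ q ∈ l, p.1 ≤ q.1 := (List.pairwise_cons.mp hl).1
    have hcl' : ∀ q ∈ l, c.1 ≤ q.1 := fun q hq => hcl q (List.mem_cons_of_mem _ hq)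
    simp only [List.foldl_cons]
    by_cases hov : p.1 ≤ c.2
    · by_cases hext : c.2 < p.2
      · -- extend cur to (c.1, p.2)
        have hstep : pvMergeStep (m, some c) p = (m, some (c.1, p.2)) := by
          simp [pvMergeStep, hov, hext]
        rw [hstep]
        have hinv' : (m ++ [(c.1, p.2)]).Pairwise pvR := by
          refine List.pairwise_append.mpr ⟨(List.pairwise_append.mp hinv).1, by simp, ?_⟩
          intro a ha b hb
          obtain ⟨h1, h2⟩ := (pvR_def _ _).mp ((List.pairwise_append.mp hinv).2.2 a ha c (by simp))
          simp only [List.mem_singleton] at hb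
          subst hb
          exact (pvR_def _ _).mpr ⟨h1, h2⟩
        obtain ⟨hcov, hpw⟩ := ih m (c.1, p.2) hl' (fun q hq => hcl' q hq) hinv'
        refine ⟨fun t => ?_, hpw⟩
        rw [hcov t]
        simp only [pvCov_append, pvCov_cons, pvCov_nil, Bool.or_false]
        rw [Bool.eq_iff_iff]
        simp only [Bool.or_eq_true, Bool.and_eq_true, decide_eq_true_eq]
        constructor
        · rintro ((hm | hc) | hli)
          · exact Or.inl (Or.inl hm)
          · -- t ∈ [c.1, p.2] : either in [c.1, c.2] or in [p.1, p.2]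
            by_cases ht : t ≤ c.2
            · exact Or.inl (Or.inr ⟨hc.1, ht⟩)
            · exact Or.inr (Or.inl ⟨by omega, hc.2⟩)
          · exact Or.inr (Or.inr hli)
        · rintro ((hm | hc) | hp | hli)
          · exact Or.inl (Or.inl hm)
          · exact Or.inl (Or.inr ⟨hc.1, by omega⟩)
          · exact Or.inl (Or.inr ⟨by omega, hp.2⟩)
          · exact Or.inr hli
      · -- p swallowed by cur
        have hstep : pvMergeStep (m, some c) p = (m, some c) := by
          simp [pvMergeStep, hov, hext]
        rw [hstep]
        obtain ⟨hcov, hpw⟩ := ih m c hl' hcl' hinv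
        refine ⟨fun t => ?_, hpw⟩
        rw [hcov t]
        simp only [pvCov_append, pvCov_cons, pvCov_nil, Bool.or_false]
        rw [Bool.eq_iff_iff]
        simp only [Bool.or_eq_true, Bool.and_eq_true, decide_eq_true_eq]
        constructor
        · rintro ((hm | hc) | hli)
          · exact Or.inl (Or.inl hm)
          · exact Or.inl (Or.inr hc)
          · exact Or.inr (Or.inr hli)
        · rintro ((hm | hc) | hp | hli)
          · exact Or.inl (Or.inl hm)
          · exact Or.inl (Or.inr hc)
          · exact Or.inl (Or.inr ⟨by omega, by omega⟩)
          · exact Or.inr hli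
    · -- close cur, start p
      have hstep : pvMergeStep (m, some c) p = (m ++ [c], some p) := by
        simp [pvMergeStep, hov]
      rw [hstep]
      have hinv' : ((m ++ [c]) ++ [p]).Pairwise pvR := by
        refine List.pairwise_append.mpr ⟨hinv, by simp, ?_⟩
        intro a ha b hb
        simp only [List.mem_singleton] at hb
        subst hb
        rcases List.mem_append.mp ha with ham | hac
        · obtain ⟨h1, h2⟩ := (pvR_def _ _).mp ((List.pairwise_append.mp hinv).2.2 a ham c (by simp))
          exact (pvR_def _ _).mpr ⟨by omega, by omega⟩
        · simp only [List.mem_singleton] at hac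
          subst hac
          exact (pvR_def _ _).mpr ⟨hcp, by omega⟩
      obtain ⟨hcov, hpw⟩ := ih (m ++ [c]) p hl' hpl hinv'
      refine ⟨fun t => ?_, hpw⟩
      rw [hcov t]
      simp only [pvCov_append, pvCov_cons, pvCov_nil, Bool.or_false]
      rw [Bool.eq_iff_iff]
      simp only [Bool.or_eq_true]
      tauto

-- B's merged list: same coverage as the raw pairs, pairwise-disjoint and ordered
theorem pvMerged_spec (ivs : List (Int × Int)) (hs : ivs.Pairwise (fun a b => a.1 ≤ b.1)) :
    (∀ t, pvCov (pvFinalize (ivs.foldl pvMergeStep ([], none))) t = pvCov ivs t) ∧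
    (pvFinalize (ivs.foldl pvMergeStep ([], none))).Pairwise pvR := by
  cases ivs with
  | nil => exact ⟨fun t => rfl, List.Pairwise.nil⟩
  | cons p l =>
    have hstep : pvMergeStep ([], none) p = ([], some p) := by simp [pvMergeStep]
    simp only [List.foldl_cons, hstep]
    obtain ⟨hcov, hpw⟩ := pvMergeGo l [] p hs.tail (List.pairwise_cons.mp hs).1 (by simp)
    refine ⟨fun t => ?_, hpw⟩
    rw [hcov t]
    simp [pvCov_cons, pvCov_nil]

-- the binary-search test reads coverage off a pairwise-disjoint, ordered list
theorem pvBisect_iff (M : List (Int × Int)) (t : Int) (hpw : M.Pairwise pvR) :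
    (0 < PySem.List.bisectRight (M.map (fun p => p.1)) t ∧
      t ≤ (M.map (fun p => p.2)).getD (PySem.List.bisectRight (M.map (fun p => p.1)) t - 1) 0)
    ↔ pvCov M t = true := by
  have hsorted : (M.map (fun p => p.1)).Pairwise (· ≤ ·) := by
    rw [List.pairwise_map]
    exact hpw.imp (fun h => ((pvR_def _ _).mp h).1)
  obtain ⟨hjle, hlt, hge⟩ := PySem.List.bisectRight_spec (M.map (fun p => p.1)) t hsorted
  have hjle' : PySem.List.bisectRight (M.map (fun p => p.1)) t ≤ M.length := by
    simpa using hjle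
  have hlt' : ∀ k, (hk : k < M.length) →
      k < PySem.List.bisectRight (M.map (fun p => p.1)) t → M[k].1 ≤ t := by
    intro k hk hkj
    have := hlt k (by simpa using hk) hkj
    simpa using this
  have hge' : ∀ k, (hk : k < M.length) →
      PySem.List.bisectRight (M.map (fun p => p.1)) t ≤ k → t < M[k].1 := by
    intro k hk hkj
    have := hge k (by simpa using hk) hkj
    simpa using this
  have hgetD : ∀ (hk : PySem.List.bisectRight (M.map (fun p => p.1)) t - 1 < M.length),
      (M.map (fun p => p.2)).getD (PySem.List.bisectRight (M.map (fun p => p.1)) t - 1) 0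
      = M[PySem.List.bisectRight (M.map (fun p => p.1)) t - 1].2 := by
    intro hk
    rw [List.getD_eq_getElem (hn := by simpa using hk), List.getElem_map]
  constructor
  · rintro ⟨hjpos, hts⟩
    have hj1 : PySem.List.bisectRight (M.map (fun p => p.1)) t - 1 < M.length := by omega
    rw [pvCov_iff]
    refine ⟨M[PySem.List.bisectRight (M.map (fun p => p.1)) t - 1], List.getElem_mem hj1,
      hlt' _ hj1 (by omega), ?_⟩
    rw [hgetD hj1] at hts
    exact hts
  · intro h
    rw [pvCov_iff] at h
    obtain ⟨p, hp, h1, h2⟩ := h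
    obtain ⟨k, hk, rfl⟩ := List.getElem_of_mem hp
    have hklt : k < PySem.List.bisectRight (M.map (fun p => p.1)) t := by
      by_contra hge''
      have := hge' k hk (by omega)
      omega
    have hjpos : 0 < PySem.List.bisectRight (M.map (fun p => p.1)) t := by omega
    have hj1 : PySem.List.bisectRight (M.map (fun p => p.1)) t - 1 < M.length := by omega
    have hkj : k = PySem.List.bisectRight (M.map (fun p => p.1)) t - 1 := by
      by_contra hne
      have hklt' : k < PySem.List.bisectRight (M.map (fun p => p.1)) t - 1 := by omega
      obtain ⟨_, hgap⟩ := (pvR_def _ _).mp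
        ((List.pairwise_iff_getElem.mp hpw) k _ hk hj1 hklt')
      have hstart := hlt' _ hj1 (by omega)
      omega
    subst hkj
    refine ⟨hjpos, ?_⟩
    rw [hgetD hj1]
    exact h2

-- ===== VERDICT (by name: the statement is the Claim_ definition above) =====
theorem artifact_getter_spec : Claim_equal_artifact_getter := by
  intro time annotation _ _
  unfold Spec_artifact_getter
  rw [pvA_eq_map]
  have hs : (PySem.List.sorted
      (annotation.map (fun a => (PySem.List.pyGetD a 0 0, PySem.List.pyGetD a 1 0)))
      (fun p => p.1)).Pairwise (fun a b => a.1 ≤ b.1) :=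
    PySem.List.sorted_pairwise _ _
  have hperm := PySem.List.sorted_perm
    (annotation.map (fun a => (PySem.List.pyGetD a 0 0, PySem.List.pyGetD a 1 0)))
    (fun p => p.1) false
  obtain ⟨hcov, hpw⟩ := pvMerged_spec _ hs
  show _ = time.map (fun t =>
    if 0 < PySem.List.bisectRight
        ((pvFinalize ((PySem.List.sorted
          (annotation.map (fun a => (PySem.List.pyGetD a 0 0, PySem.List.pyGetD a 1 0)))
          (fun p => p.1)).foldl pvMergeStep ([], none))).map (fun p => p.1)) t ∧
       t ≤ ((pvFinalize ((PySem.List.sorted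
          (annotation.map (fun a => (PySem.List.pyGetD a 0 0, PySem.List.pyGetD a 1 0)))
          (fun p => p.1)).foldl pvMergeStep ([], none))).map (fun p => p.2)).getD
        (PySem.List.bisectRight
          ((pvFinalize ((PySem.List.sorted
            (annotation.map (fun a => (PySem.List.pyGetD a 0 0, PySem.List.pyGetD a 1 0)))
            (fun p => p.1)).foldl pvMergeStep ([], none))).map (fun p => p.1)) t - 1) 0
    then (0 : Int) else 1)
  refine List.map_congr_left (fun t _ => ?_)
  have hM : pvCov (pvFinalize ((PySem.List.sorted
      (annotation.map (fun a => (PySem.List.pyGetD a 0 0, PySem.List.pyGetD a 1 0)))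
      (fun p => p.1)).foldl pvMergeStep ([], none))) t
      = pvCov (annotation.map (fun a => (PySem.List.pyGetD a 0 0, PySem.List.pyGetD a 1 0))) t := by
    rw [hcov t]
    exact hperm.any_eq
  have hiff := pvBisect_iff _ t hpw
  by_cases hc : pvCov (annotation.map (fun a => (PySem.List.pyGetD a 0 0, PySem.List.pyGetD a 1 0))) t = true
  · rw [if_pos hc, if_pos (hiff.mpr (by rw [hM]; exact hc))]
  · rw [if_neg hc, if_neg (fun h => hc (by rw [← hM]; exact hiff.mp h))]
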